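-- pv_equiv track=rewrite | github.com/Hyoshin-Park/Github_Zerobase | 프로그래머스(22.02.15)/폰켓몬/#progr1.py | solution
-- ===== SOURCE A (Python) =====
-- def solution(nums):
--     num = 0
--     answer = list(set(nums))
--     count = len(nums) // 2
--     for value in answer:
--         if (num < count):
--             num += 1
--
--     return num
-- ===== SOURCE B (Python) =====
-- def solution(nums):
--     return min(len(set(nums)), len(nums) // 2)
-- ===== Notes on version B (the rewrite author's own statement) =====
-- stated objective: simpler
-- what changed: Replaced A's loop that increments a capped counter once per distinct element with the closed form min(len(set(nums)), len(nums)//2).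
import Mathlib
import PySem

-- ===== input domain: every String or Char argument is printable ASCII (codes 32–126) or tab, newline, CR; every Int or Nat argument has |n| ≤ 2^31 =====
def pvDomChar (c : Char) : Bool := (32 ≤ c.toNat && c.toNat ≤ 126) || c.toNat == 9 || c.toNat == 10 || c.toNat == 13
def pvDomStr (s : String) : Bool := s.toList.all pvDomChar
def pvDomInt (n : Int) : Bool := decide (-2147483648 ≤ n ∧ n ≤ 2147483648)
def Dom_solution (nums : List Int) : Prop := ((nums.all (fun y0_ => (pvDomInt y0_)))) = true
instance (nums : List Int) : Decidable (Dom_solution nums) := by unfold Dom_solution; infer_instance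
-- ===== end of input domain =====

-- B replaces A's capped-increment loop over the distinct elements with the closed form min(len(set(nums)), len(nums)//2); objective: simpler.


-- ===== PORT A =====
-- the loop over list(set(nums)) only counts elements, so iterating the Set's list is order-independent
def solution (nums : List Int) : Int :=
  let num : Int := 0
  let answer : List Int := PySem.Set.ofList nums
  let count : Int := PySem.Int.floordiv (nums.length : Int) 2
  let num := answer.foldl (fun num _value => if num < count then num + 1 else num) num
  num

-- ===== PORT B =====
def solution_alt (nums : List Int) : Int :=
  min ((PySem.Set.ofList nums).length : Int) (PySem.Int.floordiv (nums.length : Int) 2)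

-- ===== PRECONDITION & SPEC =====
def Spec_solution (nums : List Int) (out : Int) : Prop := out = solution_alt nums
instance (nums : List Int) (out : Int) : Decidable (Spec_solution nums out) := by unfold Spec_solution; infer_instance

-- ===== CLAIM (what is proved, stated in full; the proofs are below) =====
def Claim_equal_solution : Prop := ∀ (nums : List Int), Dom_solution nums → Spec_solution nums (solution nums)

-- ===== LEMMAS AND PROOFS =====
theorem foldl_cap (l : List Int) (count num : Int) (h : num ≤ count) :
    l.foldl (fun num _ => if num < count then num + 1 else num) num
      = min (num + l.length) count := by
  induction l generalizing num with
  | nil => simp; omega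
  | cons x xs ih =>
    simp only [List.foldl_cons, List.length_cons]
    by_cases hlt : num < count
    · rw [if_pos hlt, ih (num + 1) (by omega)]; push_cast; omega
    · rw [if_neg hlt, ih num h]; push_cast; omega

-- ===== VERDICT (by name: the statement is the Claim_ definition above) =====
theorem solution_spec : Claim_equal_solution := by
  intro nums _
  unfold Spec_solution solution solution_alt
  simp only []
  have hcount : (0 : Int) ≤ PySem.Int.floordiv (nums.length : Int) 2 := by
    rw [PySem.Int.floordiv_eq_ediv_of_pos (by omega)]
    exact Int.ediv_nonneg (by positivity) (by omega)
  rw [foldl_cap _ _ _ hcount]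
  omega
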